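-- pv_equiv track=rewrite | github.com/ZhiHui6/zhihui_nodes_comfyui | Nodes/FreeLoraLoader/FreeLoraLoader.py | _detect_lora_type
-- ===== SOURCE A (Python) =====
-- def _detect_lora_type(keys):
--     """检测LORA类型"""
--     if not keys:
--         return "Unknown"
--
--     # 检查是否为LoRA
--     if any("lora_up" in key or "lora_down" in key for key in keys):
--         return "LoRA"
--
--     # 检查是否为LyCORIS
--     if any("lokr" in key or "hada" in key for key in keys):
--         return "LyCORIS"
--
--     # 检查是否为Textual Inversion
--     if any("string_to_param" in key for key in keys):
--         return "Textual Inversion"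
--
--     return "LoRA/Adapter"
-- ===== SOURCE B (Python) =====
-- _LABELS = ["LoRA", "LyCORIS", "Textual Inversion", "LoRA/Adapter"]
--
-- def _rank(key):
--     if "lora_up" in key or "lora_down" in key:
--         return 0
--     if "lokr" in key or "hada" in key:
--         return 1
--     if "string_to_param" in key:
--         return 2
--     return 3
--
-- def _detect_lora_type(keys):
--     if not keys:
--         return "Unknown"
--     best = 3
--     for key in keys:
--         r = _rank(key)
--         if r < best:
--             best = r
--             if best == 0:
--                 break
--     return _LABELS[best]
-- ===== Notes on version B (the rewrite author's own statement) =====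
-- stated objective: alternative
-- what changed: Instead of A's three per-pattern any() scans over the whole list, B classifies each key once into a numeric priority rank, min-reduces the ranks in a single pass with early exit at rank 0, and indexes a label table with the minimum.
import Mathlib
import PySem

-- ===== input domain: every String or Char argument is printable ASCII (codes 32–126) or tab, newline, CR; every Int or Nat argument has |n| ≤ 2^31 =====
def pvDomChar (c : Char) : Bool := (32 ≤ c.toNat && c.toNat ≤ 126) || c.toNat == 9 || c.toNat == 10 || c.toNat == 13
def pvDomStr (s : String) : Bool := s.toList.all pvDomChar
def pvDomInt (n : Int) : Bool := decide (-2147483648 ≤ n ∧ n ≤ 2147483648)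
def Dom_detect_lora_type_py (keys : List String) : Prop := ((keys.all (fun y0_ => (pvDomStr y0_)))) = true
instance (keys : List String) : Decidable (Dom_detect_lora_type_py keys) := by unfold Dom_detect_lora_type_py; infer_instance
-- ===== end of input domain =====

-- B classifies each key once into a numeric priority rank, min-reduces with early exit, and indexes a label table, instead of A's three per-pattern any() scans (alternative decomposition, same cost).
-- ===== PORT A =====
def detect_lora_type_py (keys : List String) : String :=
  if keys = [] then "Unknown"
  else if keys.any (fun key => PySem.Str.isIn "lora_up" key || PySem.Str.isIn "lora_down" key) then "LoRA"
  else if keys.any (fun key => PySem.Str.isIn "lokr" key || PySem.Str.isIn "hada" key) then "LyCORIS"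
  else if keys.any (fun key => PySem.Str.isIn "string_to_param" key) then "Textual Inversion"
  else "LoRA/Adapter"

-- ===== PORT B =====
def rankKey (key : String) : Nat :=
  if PySem.Str.isIn "lora_up" key || PySem.Str.isIn "lora_down" key then 0
  else if PySem.Str.isIn "lokr" key || PySem.Str.isIn "hada" key then 1
  else if PySem.Str.isIn "string_to_param" key then 2
  else 3

def labelOf : Nat → String
  | 0 => "LoRA"
  | 1 => "LyCORIS"
  | 2 => "Textual Inversion"
  | _ => "LoRA/Adapter"

-- the for-loop of Source B: min-reduce ranks with early break at 0
def minRank : List String → Nat → Nat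
  | [], best => best
  | key :: ks, best =>
    let r := rankKey key
    let best' := if r < best then r else best
    if best' = 0 then 0 else minRank ks best'

def detect_lora_type_py_alt (keys : List String) : String :=
  if keys = [] then "Unknown"
  else labelOf (minRank keys 3)

-- ===== PRECONDITION & SPEC =====
def Spec_detect_lora_type_py (keys : List String) (out : String) : Prop := out = detect_lora_type_py_alt keys
instance (keys : List String) (out : String) : Decidable (Spec_detect_lora_type_py keys out) := by unfold Spec_detect_lora_type_py; infer_instance

-- ===== CLAIM (what is proved, stated in full; the proofs are below) =====
def Claim_equal_detect_lora_type_py : Prop := ∀ (keys : List String), Dom_detect_lora_type_py keys → Spec_detect_lora_type_py keys (detect_lora_type_py keys)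

-- ===== LEMMAS AND PROOFS =====

-- the characteristic rank of a whole list, in A's staged-scan form
def chi (ks : List String) : Nat :=
  if ks.any (fun key => PySem.Str.isIn "lora_up" key || PySem.Str.isIn "lora_down" key) then 0
  else if ks.any (fun key => PySem.Str.isIn "lokr" key || PySem.Str.isIn "hada" key) then 1
  else if ks.any (fun key => PySem.Str.isIn "string_to_param" key) then 2
  else 3

lemma chi_le (ks : List String) : chi ks ≤ 3 := by
  unfold chi; split_ifs <;> omega

lemma ite_min (r b : Nat) : (if r < b then r else b) = min r b := by
  rw [Nat.min_def]; split_ifs <;> omega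

lemma chi_cons (k : String) (ks : List String) : chi (k :: ks) = min (rankKey k) (chi ks) := by
  unfold chi rankKey
  rcases Bool.eq_false_or_eq_true (PySem.Str.isIn "lora_up" k || PySem.Str.isIn "lora_down" k) with h0 | h0 <;>
    rcases Bool.eq_false_or_eq_true (PySem.Str.isIn "lokr" k || PySem.Str.isIn "hada" k) with h1 | h1 <;>
      rcases Bool.eq_false_or_eq_true (PySem.Str.isIn "string_to_param" k) with h2 | h2 <;>
        simp only [List.any_cons, h0, h1, h2, Bool.true_or, Bool.false_or, Nat.min_def] <;>
          split_ifs <;> omega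

lemma minRank_char (ks : List String) (b : Nat) (hb : b ≤ 3) : minRank ks b = min b (chi ks) := by
  induction ks generalizing b with
  | nil =>
    simp only [minRank, chi, List.any_nil, Bool.false_eq_true, if_false, Nat.min_def]
    split_ifs <;> omega
  | cons k ks ih =>
    simp only [minRank, ite_min, chi_cons]
    by_cases hz : min (rankKey k) b = 0
    · rw [if_pos hz]
      rw [Nat.min_def] at hz
      simp only [Nat.min_def] at *
      split_ifs at * <;> omega
    · rw [if_neg hz, ih _ (by rw [Nat.min_def]; split_ifs <;> omega)]
      simp only [Nat.min_def] at *
      split_ifs at * <;> omega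

-- ===== VERDICT (by name: the statement is the Claim_ definition above) =====
theorem detect_lora_type_py_spec : Claim_equal_detect_lora_type_py := by
  intro keys _
  unfold Spec_detect_lora_type_py detect_lora_type_py detect_lora_type_py_alt
  by_cases h : keys = []
  · simp [h]
  · rw [if_neg h, if_neg h, minRank_char keys 3 (by omega)]
    have hle := chi_le keys
    have h3 : min 3 (chi keys) = chi keys := by rw [Nat.min_def]; split_ifs <;> omega
    rw [h3]
    unfold chi
    split_ifs <;> rfl
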